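-- pv_equiv track=rewrite | github.com/suraj-anand/DSA | context/1d-array/goodPair.py | good_pair_2
-- ===== SOURCE A (Python) =====
-- def good_pair_2(array, n):
--     hashset = set()
--     for i in range(len(array)):
--         if array[i] in hashset:
--             return 1
--         else:
--             hashset.add(abs(n-array[i]))
--     return 0
-- ===== SOURCE B (Python) =====
-- def good_pair_2(array, n):
--     return int(any(array[i] == abs(n - array[j])
--                    for i in range(len(array)) for j in range(i)))
-- ===== Notes on version B (the rewrite author's own statement) =====
-- stated objective: alternative
-- what changed: Replaced the hashset single pass (membership check then add) with a stateless nested existence scan: any i with some earlier j such that array[i] == abs(n - array[j]), cast to 1/0.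
import Mathlib
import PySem

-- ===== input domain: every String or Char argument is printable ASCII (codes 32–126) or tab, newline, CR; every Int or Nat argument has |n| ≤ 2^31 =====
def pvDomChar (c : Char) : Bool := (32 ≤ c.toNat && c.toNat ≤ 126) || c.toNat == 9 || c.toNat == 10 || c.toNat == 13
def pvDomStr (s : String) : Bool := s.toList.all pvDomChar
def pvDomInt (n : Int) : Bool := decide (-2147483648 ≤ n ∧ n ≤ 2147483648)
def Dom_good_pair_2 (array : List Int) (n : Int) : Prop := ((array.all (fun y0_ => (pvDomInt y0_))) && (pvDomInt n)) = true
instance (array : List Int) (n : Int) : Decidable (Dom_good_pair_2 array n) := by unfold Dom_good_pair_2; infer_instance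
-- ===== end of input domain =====

-- B replaces A's stateful hashset pass by a stateless nested existence scan (alternative decomposition; not faster).

-- ===== PORT A =====
-- the for-loop over array with the growing hashset; early 'return 1' = stopping the recursion
def good_pair_2_loop (n : Int) (hs : PySem.Set Int) : List Int → Int
  | [] => 0
  | x :: rest =>
      if PySem.Set.contains hs x then 1
      else good_pair_2_loop n (PySem.Set.add hs |n - x|) rest

def good_pair_2 (array : List Int) (n : Int) : Int :=
  good_pair_2_loop n PySem.Set.empty array

-- ===== PORT B =====
-- int(any(array[i] == abs(n - array[j]) for i in range(len(array)) for j in range(i)))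
def good_pair_2_alt (array : List Int) (n : Int) : Int :=
  if (List.range array.length).any (fun i =>
       (List.range i).any (fun j => array.getD i 0 == |n - array.getD j 0|))
  then 1 else 0

-- ===== PRECONDITION & SPEC =====
def Spec_good_pair_2 (array : List Int) (n : Int) (out : Int) : Prop := out = good_pair_2_alt array n
instance (array : List Int) (n : Int) (out : Int) : Decidable (Spec_good_pair_2 array n out) := by unfold Spec_good_pair_2; infer_instance

-- ===== CLAIM (what is proved, stated in full; the proofs are below) =====
def Claim_equal_good_pair_2 : Prop := ∀ (array : List Int) (n : Int), Dom_good_pair_2 array n → Spec_good_pair_2 array n (good_pair_2 array n)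

-- ===== LEMMAS AND PROOFS =====

theorem good_pair_2_loop_zero_or_one (n : Int) (hs : PySem.Set Int) (l : List Int) :
    good_pair_2_loop n hs l = 0 ∨ good_pair_2_loop n hs l = 1 := by
  induction l generalizing hs with
  | nil => left; rfl
  | cons x rest ih =>
      simp only [good_pair_2_loop]
      split
      · right; rfl
      · exact ih _

theorem good_pair_2_loop_eq_one_iff (n : Int) (hs : PySem.Set Int) (l : List Int) :
    good_pair_2_loop n hs l = 1 ↔
      ∃ i, ∃ _ : i < l.length,
        l[i] ∈ hs ∨ ∃ j, ∃ _ : j < i, l[i] = |n - l[j]| := by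
  induction l generalizing hs with
  | nil => simp [good_pair_2_loop]
  | cons x rest ih =>
      simp only [good_pair_2_loop]
      by_cases hc : PySem.Set.contains hs x
      · simp only [hc, if_true]
        constructor
        · intro _
          exact ⟨0, by simp, Or.inl (by simpa using (PySem.Set.contains_iff hs x).1 hc)⟩
        · intro _; trivial
      · simp only [hc, Bool.false_eq_true, if_false]
        rw [ih]
        constructor
        · rintro ⟨i, hi, hcase⟩
          refine ⟨i + 1, by simpa using Nat.succ_lt_succ hi, ?_⟩
          rcases hcase with hmem | ⟨j, hj, heq⟩
          · rcases (PySem.Set.mem_add _ _ _).1 hmem with h | h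
            · exact Or.inl (by simpa using h)
            · exact Or.inr ⟨0, Nat.succ_pos i, by simpa using h⟩
          · exact Or.inr ⟨j + 1, Nat.succ_lt_succ hj, by simpa using heq⟩
        · rintro ⟨i, hi, hcase⟩
          match i, hi with
          | 0, _ =>
              rcases hcase with hmem | ⟨j, hj, _⟩
              · exact absurd ((PySem.Set.contains_iff hs x).2 (by simpa using hmem)) hc
              · omega
          | i' + 1, hi =>
              refine ⟨i', by simpa using Nat.lt_of_succ_lt_succ hi, ?_⟩
              rcases hcase with hmem | ⟨j, hj, heq⟩
              · exact Or.inl ((PySem.Set.mem_add _ _ _).2 (Or.inl (by simpa using hmem)))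
              · match j, hj with
                | 0, _ =>
                    exact Or.inl ((PySem.Set.mem_add _ _ _).2 (Or.inr (by simpa using heq)))
                | j' + 1, hj =>
                    exact Or.inr ⟨j', Nat.lt_of_succ_lt_succ hj, by simpa using heq⟩

theorem good_pair_2_alt_cond_iff (array : List Int) (n : Int) :
    ((List.range array.length).any (fun i =>
       (List.range i).any (fun j => array.getD i 0 == |n - array.getD j 0|)) = true) ↔
      ∃ i, ∃ _ : i < array.length,
        array[i] ∈ (PySem.Set.empty : PySem.Set Int) ∨
          ∃ j, ∃ _ : j < i, array[i] = |n - array[j]| := by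
  simp only [List.any_eq_true, List.mem_range, beq_iff_eq]
  constructor
  · rintro ⟨i, hi, j, hj, heq⟩
    refine ⟨i, hi, Or.inr ⟨j, hj, ?_⟩⟩
    rwa [List.getD_eq_getElem _ _ hi, List.getD_eq_getElem _ _ (hj.trans hi)] at heq
  · rintro ⟨i, hi, hcase⟩
    rcases hcase with hmem | ⟨j, hj, heq⟩
    · simp [PySem.Set.empty] at hmem
    · exact ⟨i, hi, j, hj, by
        rwa [List.getD_eq_getElem _ _ hi, List.getD_eq_getElem _ _ (hj.trans hi)]⟩

-- ===== VERDICT (by name: the statement is the Claim_ definition above) =====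
theorem good_pair_2_spec : Claim_equal_good_pair_2 := by
  intro array n _
  unfold Spec_good_pair_2 good_pair_2 good_pair_2_alt
  by_cases h : (List.range array.length).any (fun i =>
       (List.range i).any (fun j => array.getD i 0 == |n - array.getD j 0|)) = true
  · rw [if_pos h]
    exact (good_pair_2_loop_eq_one_iff n PySem.Set.empty array).2
      ((good_pair_2_alt_cond_iff array n).1 h)
  · rw [if_neg h]
    rcases good_pair_2_loop_zero_or_one n PySem.Set.empty array with h0 | h1
    · exact h0
    · exact absurd ((good_pair_2_alt_cond_iff array n).2
        ((good_pair_2_loop_eq_one_iff n PySem.Set.empty array).1 h1)) h
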